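-- pv_equiv track=rewrite | github.com/conversationai/wikidetox | conversation_reconstruction/dataflow/conversation_reconstruction/construct_utils/utils/insert_utils.py | locate_replyTo_id
-- ===== SOURCE A (Python) =====
-- def find_pos(pos, lst):
--     h = 0
--     t = len(lst) - 1
--     mid = int((h + t) / 2)
--     ans = -1
--     while not(h > t):
--         if pos >= lst[mid]:
--             ans = mid
--             h = mid + 1
--         else:
--             t = mid - 1
--         mid = int((h + t) / 2)
--     return ans
--
-- def locate_replyTo_id(actions, action_pos, action_indentation):
--     action_lst = sorted(list(actions.keys()))
--     ind = find_pos(action_pos, action_lst)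
--     ret = None
--     while ind >= 0:
--         if actions[action_lst[ind]][1] < action_indentation:
--             return actions[action_lst[ind]][0]
--         ind -=1
--     return ret
-- ===== SOURCE B (Python) =====
-- def locate_replyTo_id(actions, action_pos, action_indentation):
--     for k in sorted(actions, reverse=True):
--         if k <= action_pos:
--             entry = actions[k]
--             if entry[1] < action_indentation:
--                 return entry[0]
--     return None
-- ===== Notes on version B (the rewrite author's own statement) =====
-- stated objective: simpler
-- what changed: Replaces the two-phase 'hand-written binary search for the boundary index, then walk backward by index' with a single guarded reverse scan over the descending-sorted keys, dropping the find_pos helper entirely.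
import Mathlib
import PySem

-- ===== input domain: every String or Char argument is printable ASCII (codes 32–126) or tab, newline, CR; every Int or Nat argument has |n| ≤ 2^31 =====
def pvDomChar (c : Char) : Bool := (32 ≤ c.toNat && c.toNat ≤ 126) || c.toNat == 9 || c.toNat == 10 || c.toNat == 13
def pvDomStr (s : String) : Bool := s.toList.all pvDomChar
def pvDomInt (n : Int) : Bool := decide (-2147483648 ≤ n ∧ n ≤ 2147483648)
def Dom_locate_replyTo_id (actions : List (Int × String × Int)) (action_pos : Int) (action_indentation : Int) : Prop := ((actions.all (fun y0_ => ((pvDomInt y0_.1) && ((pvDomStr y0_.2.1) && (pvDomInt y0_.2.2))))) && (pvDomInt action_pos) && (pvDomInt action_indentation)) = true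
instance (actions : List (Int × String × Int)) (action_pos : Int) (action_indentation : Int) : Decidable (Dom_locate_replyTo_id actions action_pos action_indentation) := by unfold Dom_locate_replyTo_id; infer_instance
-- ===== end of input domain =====

-- B replaces A's hand-written binary search + backward index walk by one guarded reverse scan
-- over the descending-sorted keys (objective: simpler; same O(n log n) cost).

-- ===== PORT A =====
-- while loop of find_pos; mid is recomputed from h and t at each entry (same value as A's
-- end-of-body update).  lst[mid]: mid is always in range when reached from find_pos, so the
-- `.getD 0` default of the exact pyGet? primitive is never taken.
def findPosLoop (pos : Int) (lst : List Int) (h t ans : Int) : Int :=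
  if h > t then ans
  else
    let mid := PySem.Int.floordiv (h + t) 2
    if pos ≥ (PySem.List.pyGet? lst mid).getD 0 then
      findPosLoop pos lst (mid + 1) t mid
    else
      findPosLoop pos lst h (mid - 1) ans
termination_by (t - h + 1).toNat
decreasing_by
  all_goals
    have hb := PySem.Int.floordiv_two_mid_bounds (lo := h) (hi := t) (by omega)
    omega

def find_pos (pos : Int) (lst : List Int) : Int :=
  findPosLoop pos lst 0 ((lst.length : Int) - 1) (-1)

-- the `while ind >= 0` walk of locate_replyTo_id; indices and keys are always valid when
-- reached from locate_replyTo_id, so the getD defaults are never taken.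
def locateLoop (actions : PySem.Dict Int (String × Int)) (action_lst : List Int)
    (action_indentation : Int) (ind : Int) : Option String :=
  if ind ≥ 0 then
    let v := actions.getD ((PySem.List.pyGet? action_lst ind).getD 0) ("", 0)
    if v.2 < action_indentation then some v.1
    else locateLoop actions action_lst action_indentation (ind - 1)
  else none
termination_by (ind + 1).toNat
decreasing_by omega

def locate_replyTo_id (actions : List (Int × String × Int)) (action_pos : Int) (action_indentation : Int) : Option String :=
  let d := PySem.Dict.ofList actions
  let action_lst := PySem.List.sorted d.keys (fun k => k) false
  let ind := find_pos action_pos action_lst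
  locateLoop d action_lst action_indentation ind

-- ===== PORT B =====
def locate_replyTo_id_alt (actions : List (Int × String × Int)) (action_pos : Int) (action_indentation : Int) : Option String :=
  let d := PySem.Dict.ofList actions
  (PySem.List.sorted d.keys (fun k => k) true).findSome? (fun k =>
    if k ≤ action_pos then
      let entry := d.getD k ("", 0)
      if entry.2 < action_indentation then some entry.1 else none
    else none)

-- ===== PRECONDITION & SPEC =====
def Spec_locate_replyTo_id (actions : List (Int × String × Int)) (action_pos : Int) (action_indentation : Int) (out : Option String) : Prop := out = locate_replyTo_id_alt actions action_pos action_indentation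
instance (actions : List (Int × String × Int)) (action_pos : Int) (action_indentation : Int) (out : Option String) : Decidable (Spec_locate_replyTo_id actions action_pos action_indentation out) := by unfold Spec_locate_replyTo_id; infer_instance

-- ===== CLAIM (what is proved, stated in full; the proofs are below) =====
def Claim_equal_locate_replyTo_id : Prop := ∀ (actions : List (Int × String × Int)) (action_pos : Int) (action_indentation : Int), Dom_locate_replyTo_id actions action_pos action_indentation → Spec_locate_replyTo_id actions action_pos action_indentation (locate_replyTo_id actions action_pos action_indentation)

-- ===== LEMMAS AND PROOFS =====

theorem pairwise_lt_of_le_nodup (l : List Int) (hle : l.Pairwise (· ≤ ·)) (hnd : l.Nodup) :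
    l.Pairwise (· < ·) := by
  rw [List.pairwise_iff_getElem] at hle ⊢
  intro i j hi hj hij
  rcases lt_or_eq_of_le (hle i j hi hj hij) with h | h
  · exact h
  · exact absurd ((List.Nodup.getElem_inj_iff hnd).mp h) (by omega)

theorem takeWhile_length_eq {p : Int → Bool} :
    ∀ (lst : List Int) (n : Nat), n ≤ lst.length →
    (∀ i (_ : i < lst.length), i < n → p lst[i] = true) →
    (∀ (_ : n < lst.length), p lst[n] = false) →
    (lst.takeWhile p).length = n
  | [], n, hn, _, _ => by
      have : n = 0 := by simpa using hn
      simp [this]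
  | x :: xs, 0, _, _, h2 => by
      have := h2 (by simp)
      simp_all [List.takeWhile]
  | x :: xs, n + 1, hn, h1, h2 => by
      have hx : p x = true := h1 0 (by simp) (by omega)
      have ih := takeWhile_length_eq xs n (by simpa using hn)
        (fun i hi hin => h1 (i + 1) (by simpa using Nat.succ_lt_succ hi) (by omega))
        (fun hnl => h2 (by simpa using Nat.succ_lt_succ hnl))
      simp [List.takeWhile, hx, ih]

theorem findPosLoop_spec (pos : Int) (lst : List Int)
    (hp : lst.Pairwise (· ≤ ·)) :
    ∀ (h t ans : Int), 0 ≤ h → h ≤ t + 1 → t ≤ (lst.length : Int) - 1 →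
    ans = h - 1 →
    (∀ i (_ : i < lst.length), (i : Int) < h → lst[i] ≤ pos) →
    (∀ i (_ : i < lst.length), t < (i : Int) → pos < lst[i]) →
    findPosLoop pos lst h t ans =
      ((lst.takeWhile (fun k => decide (k ≤ pos))).length : Int) - 1 := by
  intro h t ans hh0 hht ht hans hlow hhigh
  rw [findPosLoop]
  by_cases hgt : h > t
  · rw [if_pos hgt]
    have hlen : h.toNat ≤ lst.length := by omega
    have hlw := takeWhile_length_eq (p := fun k => decide (k ≤ pos)) lst h.toNat hlen
      (fun i hi hin => by simpa using hlow i hi (by omega))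
      (fun hnl => by
        have := hhigh h.toNat hnl (by omega)
        simp only [decide_eq_false_iff_not]
        omega)
    omega
  · rw [if_neg hgt]
    have hle : h ≤ t := by omega
    have hb := PySem.Int.floordiv_two_mid_bounds (lo := h) (hi := t) hle
    dsimp only
    set mid := PySem.Int.floordiv (h + t) 2 with hmid
    have hmr : mid.toNat < lst.length := by omega
    have hget : (PySem.List.pyGet? lst mid).getD 0 = lst[mid.toNat] := by
      rw [PySem.List.pyGet?_of_nonneg lst (by omega), List.getElem?_eq_getElem hmr]
      rfl
    have hmono : ∀ i j (_ : i < lst.length) (_ : j < lst.length), i ≤ j → lst[i] ≤ lst[j] := by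
      intro i j hi hj hij
      rcases Nat.lt_or_eq_of_le hij with h' | h'
      · exact (List.pairwise_iff_getElem.mp hp) i j hi hj h'
      · subst h'
        exact le_rfl
    rw [hget]
    by_cases hc : pos ≥ lst[mid.toNat]
    · rw [if_pos hc]
      exact findPosLoop_spec pos lst hp (mid + 1) t mid (by omega) (by omega) ht (by omega)
        (fun i hi hlt => le_trans (hmono i mid.toNat hi hmr (by omega)) hc)
        hhigh
    · rw [if_neg hc]
      exact findPosLoop_spec pos lst hp h (mid - 1) ans hh0 (by omega) (by omega) hans hlow
        (fun i hi hlt => lt_of_lt_of_le (by omega) (hmono mid.toNat i hmr hi (by omega)))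
termination_by h t ans => (t - h + 1).toNat
decreasing_by all_goals omega

theorem find_pos_spec (pos : Int) (lst : List Int) (hp : lst.Pairwise (· ≤ ·)) :
    find_pos pos lst = ((lst.takeWhile (fun k => decide (k ≤ pos))).length : Int) - 1 := by
  refine findPosLoop_spec pos lst hp 0 ((lst.length : Int) - 1) (-1) le_rfl (by omega)
    (by omega) (by omega) (fun i hi h => absurd h (by omega)) (fun i hi h => absurd h (by omega))

theorem locateLoop_take (d : PySem.Dict Int (String × Int)) (lst : List Int) (indent : Int) :
    ∀ (n : Nat), n ≤ lst.length →
    locateLoop d lst indent ((n : Int) - 1) =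
      ((lst.take n).reverse).findSome? (fun k =>
        let v := d.getD k ("", 0)
        if v.2 < indent then some v.1 else none)
  | 0, _ => by
      rw [locateLoop]
      norm_num
  | n + 1, hn => by
      have hlt : n < lst.length := by omega
      have harg : ((n + 1 : Nat) : Int) - 1 = (n : Int) := by push_cast; ring
      rw [harg, locateLoop, if_pos (by positivity)]
      have hget : (PySem.List.pyGet? lst (n : Int)).getD 0 = lst[n] := by
        rw [PySem.List.pyGet?_natCast, List.getElem?_eq_getElem hlt]
        rfl
      have ih := locateLoop_take d lst indent n (by omega)
      rw [List.take_add_one, List.getElem?_eq_getElem hlt]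
      simp only [Option.toList_some, List.reverse_append, List.reverse_cons, List.reverse_nil,
        List.nil_append, List.cons_append, List.findSome?_cons]
      rw [hget]
      by_cases hv : (d.getD lst[n] ("", 0)).2 < indent
      · rw [if_pos hv, if_pos hv]
      · rw [if_neg hv, if_neg hv, ih]

theorem findSome?_guard_true (pos : Int) (f : Int → Option String) :
    ∀ (l : List Int), (∀ x ∈ l, x ≤ pos) →
    (l.findSome? fun k => if k ≤ pos then f k else none) = l.findSome? f
  | [], _ => rfl
  | x :: xs, h => by
      have hx : x ≤ pos := h x (by simp)
      have ih := findSome?_guard_true pos f xs (fun y hy => h y (by simp [hy]))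
      simp [List.findSome?_cons, hx, ih]

theorem dropWhile_gt (pos : Int) :
    ∀ (lst : List Int), lst.Pairwise (· ≤ ·) →
    ∀ x ∈ lst.dropWhile (fun k => decide (k ≤ pos)), pos < x
  | [], _, x, hx => by simp at hx
  | y :: ys, hp, x, hx => by
      by_cases hy : y ≤ pos
      · rw [List.dropWhile_cons_of_pos (by simpa using hy)] at hx
        exact dropWhile_gt pos ys hp.tail x hx
      · rw [List.dropWhile_cons_of_neg (by simpa using hy)] at hx
        rcases (List.mem_cons).mp hx with rfl | hmem
        · omega
        · have := (List.pairwise_cons.mp hp).1 x hmem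
          omega

-- ===== VERDICT (by name: the statement is the Claim_ definition above) =====
theorem locate_replyTo_id_spec : Claim_equal_locate_replyTo_id := by
  intro actions pos indent _
  unfold Spec_locate_replyTo_id
  set d := PySem.Dict.ofList actions with hd
  set keys := d.keys with hkeys
  set lst := PySem.List.sorted keys (fun k => k) false with hlst
  have hperm : lst.Perm keys := PySem.List.sorted_perm keys (fun k => k) false
  have hple : lst.Pairwise (· ≤ ·) := PySem.List.sorted_pairwise keys (fun k => k)
  have hnd : lst.Nodup := hperm.nodup_iff.mpr (PySem.Dict.nodup_keys_ofList actions)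
  have hplt : lst.Pairwise (· < ·) := pairwise_lt_of_le_nodup lst hple hnd
  have hrev : PySem.List.sorted keys (fun k => k) true = lst.reverse :=
    PySem.List.sorted_rev_eq_of_perm_of_pairwise_gt keys lst.reverse (fun k => k)
      (lst.reverse_perm.trans hperm) (List.pairwise_reverse.mpr hplt)
  set f : Int → Option String := fun k =>
    let v := d.getD k ("", 0)
    if v.2 < indent then some v.1 else none with hf
  set tw := lst.takeWhile (fun k => decide (k ≤ pos)) with htw
  set dw := lst.dropWhile (fun k => decide (k ≤ pos)) with hdw
  have hsplit : tw ++ dw = lst := List.takeWhile_append_dropWhile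
  have htwlen : tw.length ≤ lst.length := by
    conv_rhs => rw [← hsplit]
    simp
  -- A side
  have hA : locateLoop d lst indent (find_pos pos lst) = (tw.reverse).findSome? f := by
    rw [find_pos_spec pos lst hple, locateLoop_take d lst indent tw.length htwlen]
    congr 1
    conv_lhs => rw [← hsplit]
    rw [List.take_left]
  -- B side
  have htwle : ∀ x ∈ tw.reverse, x ≤ pos := by
    intro x hx
    have := List.mem_takeWhile_imp ((List.mem_reverse).mp hx)
    simpa using this
  have hdwnone : ∀ x ∈ dw.reverse, (if x ≤ pos then f x else none) = none := by
    intro x hx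
    have := dropWhile_gt pos lst hple x ((List.mem_reverse).mp hx)
    rw [if_neg (by omega)]
  have hB : (lst.reverse).findSome? (fun k => if k ≤ pos then f k else none)
      = (tw.reverse).findSome? f := by
    conv_lhs => rw [← hsplit]
    rw [List.reverse_append, List.findSome?_append,
      List.findSome?_eq_none_iff.mpr hdwnone, Option.none_or,
      findSome?_guard_true pos f tw.reverse htwle]
  have e1 : locate_replyTo_id actions pos indent = locateLoop d lst indent (find_pos pos lst) := rfl
  have e2 : locate_replyTo_id_alt actions pos indent =
      (PySem.List.sorted keys (fun k => k) true).findSome? (fun k => if k ≤ pos then f k else none) := rfl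
  rw [e1, e2, hrev, hB]
  exact hA
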